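-- pv_equiv track=rewrite | github.com/Chris291/Vision | src/vision_service/scripts/face_detection.py | face_detected
-- ===== SOURCE A (Python) =====
-- FACE_AREA = 1500  # Face area for approx. 1.5m distance
--
-- def face_detected(bbs):
--     face_area = 0
--     for left, top, right, bottom in bbs:
--         tmp_face_area = (right - left) * (bottom - top)
--         if (tmp_face_area > face_area):
--             face_area = tmp_face_area
--     if (face_area > FACE_AREA):
--         return True
--     else:
--         return False
-- ===== SOURCE B (Python) =====
-- FACE_AREA = 1500  # Face area for approx. 1.5m distance
--
-- def face_detected(bbs):
--     # Recursive short-circuit: True as soon as one box's area exceeds FACE_AREA.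
--     if not bbs:
--         return False
--     left, top, right, bottom = bbs[0]
--     if (right - left) * (bottom - top) > FACE_AREA:
--         return True
--     return face_detected(bbs[1:])
-- ===== Notes on version B (the rewrite author's own statement) =====
-- stated objective: simpler
-- what changed: Replaced the running-maximum accumulator loop plus final threshold comparison with a recursive short-circuiting existence test that returns True at the first box whose area exceeds FACE_AREA, maintaining no accumulator.
import Mathlib
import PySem

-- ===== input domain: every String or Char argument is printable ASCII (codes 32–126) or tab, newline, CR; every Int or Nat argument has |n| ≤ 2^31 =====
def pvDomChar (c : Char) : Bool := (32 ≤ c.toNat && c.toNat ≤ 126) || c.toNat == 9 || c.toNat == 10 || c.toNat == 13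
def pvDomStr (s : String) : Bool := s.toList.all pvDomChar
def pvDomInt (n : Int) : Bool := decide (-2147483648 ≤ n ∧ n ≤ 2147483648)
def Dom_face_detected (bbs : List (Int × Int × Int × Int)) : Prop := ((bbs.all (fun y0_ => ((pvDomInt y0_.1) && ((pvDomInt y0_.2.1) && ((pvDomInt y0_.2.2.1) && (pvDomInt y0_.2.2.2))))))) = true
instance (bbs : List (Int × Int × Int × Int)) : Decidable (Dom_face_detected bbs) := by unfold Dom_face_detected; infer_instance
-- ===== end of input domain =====

-- B replaces A's running-maximum loop + final threshold test by a recursive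
-- short-circuiting existence test with no accumulator (objective: simpler).

def FACE_AREA : Int := 1500

-- ===== PORT A =====
-- the for-loop maintaining the running maximum face_area, then the final comparison
def face_detected (bbs : List (Int × Int × Int × Int)) : Bool :=
  let face_area := bbs.foldl (fun face_area bb =>
    match bb with
    | (left, top, right, bottom) =>
      let tmp_face_area := (right - left) * (bottom - top)
      if tmp_face_area > face_area then tmp_face_area else face_area) 0
  if face_area > FACE_AREA then true else false

-- ===== PORT B =====
-- structural recursion: empty → False; first box over threshold → True; else recurse on the tail
def face_detected_alt : List (Int × Int × Int × Int) → Bool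
  | [] => false
  | (left, top, right, bottom) :: rest =>
    if (right - left) * (bottom - top) > FACE_AREA then true
    else face_detected_alt rest

-- ===== PRECONDITION & SPEC =====
def Spec_face_detected (bbs : List (Int × Int × Int × Int)) (out : Bool) : Prop := out = face_detected_alt bbs
instance (bbs : List (Int × Int × Int × Int)) (out : Bool) : Decidable (Spec_face_detected bbs out) := by unfold Spec_face_detected; infer_instance

-- ===== CLAIM (what is proved, stated in full; the proofs are below) =====
def Claim_equal_face_detected : Prop := ∀ (bbs : List (Int × Int × Int × Int)), Dom_face_detected bbs → Spec_face_detected bbs (face_detected bbs)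

-- ===== LEMMAS AND PROOFS =====

theorem alt_cons (l t r b : Int) (rest : List (Int × Int × Int × Int)) :
    face_detected_alt ((l, t, r, b) :: rest)
      = if (r - l) * (b - t) > FACE_AREA then true else face_detected_alt rest := rfl

-- characterisation of A's fold: starting from accumulator acc, the final max exceeds
-- FACE_AREA iff acc already does or B finds a qualifying box
theorem fold_gt_iff (bbs : List (Int × Int × Int × Int)) (acc : Int) :
    (bbs.foldl (fun face_area bb =>
      match bb with
      | (left, top, right, bottom) =>
        let tmp_face_area := (right - left) * (bottom - top)
        if tmp_face_area > face_area then tmp_face_area else face_area) acc > FACE_AREA)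
    ↔ (acc > FACE_AREA ∨ face_detected_alt bbs = true) := by
  induction bbs generalizing acc with
  | nil => simp [face_detected_alt]
  | cons bb rest ih =>
    obtain ⟨l, t, r, b⟩ := bb
    rw [List.foldl_cons, ih, alt_cons]
    dsimp only
    split_ifs with hca hthr hthr
    · constructor
      · rintro (h | h)
        · simp
        · simp
      · intro _; exact Or.inl (by omega)
    · constructor
      · rintro (h | h)
        · exact absurd (by omega : (r - l) * (b - t) > FACE_AREA) hthr
        · exact Or.inr h
      · rintro (h | h)
        · exact Or.inl (by omega)
        · exact Or.inr h
    · exact ⟨fun _ => Or.inr (by simp), fun _ => Or.inl (by omega)⟩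
    · constructor
      · rintro (h | h)
        · exact Or.inl h
        · exact Or.inr h
      · rintro (h | h)
        · exact Or.inl h
        · exact Or.inr h

-- ===== VERDICT (by name: the statement is the Claim_ definition above) =====
theorem face_detected_spec : Claim_equal_face_detected := by
  intro bbs _
  unfold Spec_face_detected face_detected
  by_cases h : face_detected_alt bbs = true
  · have hg := (fold_gt_iff bbs 0).mpr (Or.inr h)
    rw [if_pos hg]
    exact h.symm
  · rw [if_neg (fun hg => by
      rcases (fold_gt_iff bbs 0).mp hg with h0 | hany
      · exact absurd h0 (by decide)
      · exact h hany)]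
    exact (Bool.eq_false_iff.mpr h).symm
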